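-- pv_equiv track=rewrite | github.com/Pokecraft-exe/Light-sharp | LScc.py | search_one
-- ===== SOURCE A (Python) =====
-- def search_one(string, char):
--     isinstring = 0
--     string = string+' '
--     first = ""
--     N = len(string)
--     for i in range(N):
--         if string[i] == '"':
--             if isinstring == 1:
--                 if string[i] == first:
--                     isinstring = 0
--             else:
--                 isinstring = 1
--                 first = '"'
--         elif string[i] == "'":
--             if isinstring == 1:
--                 if string[i] == first:
--                     isinstring = 0
--             else:
--                 isinstring = 1
--                 first = "'"
--         if string[i] == char and isinstring == 0:
--             return i
--     return -1
-- ===== SOURCE B (Python) =====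
-- def search_one(string, char):
--     s = string + ' '
--     # pass 1: per-position "inside a quoted literal" flags (state AFTER processing position i)
--     inside = []
--     state = None  # current open quote character, or None
--     for c in s:
--         if c == '"' or c == "'":
--             if state is None:
--                 state = c
--             elif state == c:
--                 state = None
--         inside.append(state is not None)
--     # pass 2: first position holding char that is not inside a literal
--     for i, c in enumerate(s):
--         if c == char and not inside[i]:
--             return i
--     return -1
-- ===== Notes on version B (the rewrite author's own statement) =====
-- stated objective: alternative
-- what changed: B replaces A's single fused loop with int/string state by two passes: first build a per-position inside-quote boolean list using an Option-typed quote state, then search that list for the first match outside quotes.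
import Mathlib
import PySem

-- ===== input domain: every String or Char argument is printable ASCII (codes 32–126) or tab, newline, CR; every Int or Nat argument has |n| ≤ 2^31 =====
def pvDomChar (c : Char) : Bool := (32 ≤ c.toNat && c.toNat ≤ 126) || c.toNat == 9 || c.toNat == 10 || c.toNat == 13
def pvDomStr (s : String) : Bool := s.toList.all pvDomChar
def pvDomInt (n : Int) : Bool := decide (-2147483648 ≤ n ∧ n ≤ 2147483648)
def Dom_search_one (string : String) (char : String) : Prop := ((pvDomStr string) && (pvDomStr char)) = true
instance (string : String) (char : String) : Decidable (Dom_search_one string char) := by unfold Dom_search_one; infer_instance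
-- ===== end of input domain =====

-- B is an alternative decomposition of A: a flag-building pass, then a search pass over the flags.

-- ===== PORT A =====
-- A's quote-state update for one character: the first two if/elif branches of the loop body,
-- acting on the (isinstring, first) pair.
def soAstep (c : Char) (isin : Int) (first : String) : Int × String :=
  if c = '"' then
    if isin = 1 then (if "\"" = first then ((0:Int), first) else (isin, first))
    else (1, "\"")
  else if c = '\'' then
    if isin = 1 then (if "'" = first then ((0:Int), first) else (isin, first))
    else (1, "'")
  else (isin, first)

-- A's fused loop: index i, isinstring and first threaded along, early return on match.
def soA (char : String) : List Char → Nat → Int → String → Int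
  | [], _, _, _ => -1
  | c :: rest, i, isin, first =>
    let p := soAstep c isin first
    if String.mk [c] = char ∧ p.1 = 0 then (i : Int)
    else soA char rest (i+1) p.1 p.2

def search_one (string : String) (char : String) : Int :=
  soA char (string ++ " ").toList 0 0 ""

-- ===== PORT B =====
-- B's quote-state update: open on a quote when no literal is open, close on the matching quote.
def soBstep (c : Char) (st : Option Char) : Option Char :=
  if c = '"' ∨ c = '\'' then
    match st with
    | none => some c
    | some q => if q = c then none else some q
  else st

-- pass 1: inside-quote flag per position (state after processing that position)
def insideFlags : List Char → Option Char → List Bool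
  | [], _ => []
  | c :: rest, st =>
    let st' := soBstep c st
    st'.isSome :: insideFlags rest st'

-- pass 2: first index whose char matches and whose flag is false
def soB (char : String) : List Char → List Bool → Nat → Int
  | c :: cs, b :: bs, i =>
    if String.mk [c] = char ∧ b = false then (i : Int) else soB char cs bs (i+1)
  | _, _, _ => -1

def search_one_alt (string : String) (char : String) : Int :=
  let s := (string ++ " ").toList
  soB char s (insideFlags s none) 0

-- ===== PRECONDITION & SPEC =====
def Spec_search_one (string : String) (char : String) (out : Int) : Prop := out = search_one_alt string char
instance (string : String) (char : String) (out : Int) : Decidable (Spec_search_one string char out) := by unfold Spec_search_one; infer_instance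

-- ===== CLAIM (what is proved, stated in full; the proofs are below) =====
def Claim_equal_search_one : Prop := ∀ (string : String) (char : String), Dom_search_one string char → Spec_search_one string char (search_one string char)

-- ===== LEMMAS AND PROOFS =====

lemma toList_mk (l : List Char) : (String.mk l).toList = l :=
  Eq.symm (String.ofList_eq.mp rfl)

lemma mk_inj {a b : Char} : String.mk [a] = String.mk [b] ↔ a = b := by
  constructor
  · intro h
    have := congrArg String.toList h
    rw [toList_mk, toList_mk] at this
    simpa using this
  · intro h; rw [h]

lemma quote_mk : ("\"" : String) = String.mk ['"'] := rfl
lemma squote_mk : ("'" : String) = String.mk ['\''] := rfl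

-- The invariant tying A's (isinstring, first) to B's optional quote state:
-- isinstring = 1 exactly when a quote is open, and then first is its one-character string.
def QRel (isin : Int) (first : String) (st : Option Char) : Prop :=
  isin = (if st.isSome then 1 else 0) ∧ ∀ q, st = some q → first = String.mk [q]

lemma step_rel (c : Char) (isin : Int) (first : String) (st : Option Char)
    (h : QRel isin first st) :
    QRel (soAstep c isin first).1 (soAstep c isin first).2 (soBstep c st) := by
  obtain ⟨h1, h2⟩ := h
  cases st with
  | none =>
    subst h1
    by_cases hq : c = '"'
    · subst hq; constructor <;> simp [soAstep, soBstep, quote_mk]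
    · by_cases hq' : c = '\''
      · subst hq'; constructor <;> simp [soAstep, soBstep, squote_mk, hq]
      · constructor <;> simp [soAstep, soBstep, hq, hq']
  | some q =>
    subst h1
    have hfirst : first = String.mk [q] := h2 q rfl
    subst hfirst
    by_cases hq : c = '"'
    · subst hq
      by_cases hcq : q = '"'
      · subst hcq; constructor <;> simp [soAstep, soBstep, quote_mk]
      · constructor <;>
          simp [soAstep, soBstep, quote_mk, mk_inj, hcq, Ne.symm hcq]
    · by_cases hq' : c = '\''
      · subst hq'
        by_cases hcq : q = '\''
        · subst hcq; constructor <;> simp [soAstep, soBstep, squote_mk, hq]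
        · constructor <;>
            simp [soAstep, soBstep, squote_mk, mk_inj, hq, hcq, Ne.symm hcq]
      · constructor <;> simp [soAstep, soBstep, hq, hq']

lemma soA_eq_soB (char : String) : ∀ (s : List Char) (i : Nat) (isin : Int) (first : String)
    (st : Option Char), QRel isin first st →
    soA char s i isin first = soB char s (insideFlags s st) i := by
  intro s
  induction s with
  | nil => intro i isin first st _; simp [soA, soB]
  | cons c rest ih =>
    intro i isin first st hrel
    have hstep := step_rel c isin first st hrel
    have h1 := hstep.1
    simp only [soA, insideFlags, soB]
    have hcond : ((soAstep c isin first).1 = 0) ↔ ((soBstep c st).isSome = false) := by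
      rw [h1]; cases (soBstep c st).isSome <;> simp
    by_cases hm : String.mk [c] = char ∧ (soAstep c isin first).1 = 0
    · rw [if_pos hm, if_pos ⟨hm.1, hcond.mp hm.2⟩]
    · have hm' : ¬ (String.mk [c] = char ∧ (soBstep c st).isSome = false) := by
        intro h; exact hm ⟨h.1, hcond.mpr h.2⟩
      rw [if_neg hm, if_neg hm']
      exact ih _ _ _ _ hstep

-- ===== VERDICT (by name: the statement is the Claim_ definition above) =====
theorem search_one_spec : Claim_equal_search_one := by
  intro string char _
  unfold Spec_search_one search_one search_one_alt
  exact soA_eq_soB char _ 0 0 "" none ⟨rfl, by intro q h; cases h⟩
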